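-- pv_equiv track=rewrite | github.com/Kesavk1/3DRNA_Prediction | specify_fun.py | identify_stem_loops
-- ===== SOURCE A (Python) =====
-- def identify_stem_loops(sequence):
--     """
--     Simple function to identify potential stem-loop regions in RNA.
--
--     Parameters:
--     -----------
--     sequence: RNA sequence
--
--     Returns:
--     --------
--     List of (start, end) indices for potential stem loops
--     """
--     # This is a simplified implementation
--     # A real implementation would use a more sophisticated algorithm
--
--     stem_loops = []
--     min_stem_length = 3
--
--     # Look for complementary regions that could form stems
--     for i in range(len(sequence) - 2*min_stem_length - 3):
--         for j in range(i + min_stem_length + 3, len(sequence) - min_stem_length):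
--             # Check if regions could form a stem
--             potential_stem = True
--             for k in range(min_stem_length):
--                 if not are_complementary(sequence[i+k], sequence[j+min_stem_length-1-k]):
--                     potential_stem = False
--                     break
--
--             if potential_stem:
--                 # Potential stem-loop found
--                 stem_loops.append((i, j + min_stem_length))
--                 break
--
--     return stem_loops
--
-- def are_complementary(base1, base2):
--     """Check if two bases are complementary in RNA."""
--     return (base1 == 'A' and base2 == 'U') or \
--            (base1 == 'U' and base2 == 'A') or \
--            (base1 == 'G' and base2 == 'C') or \
--            (base1 == 'C' and base2 == 'G') or \
--            (base1 == 'G' and base2 == 'U') or \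
--            (base1 == 'U' and base2 == 'G')  # G-U wobble pairs are valid in RNA
-- ===== SOURCE B (Python) =====
-- def identify_stem_loops(sequence):
--     """One backward sweep with a rolling first-occurrence trigram index (O(n))
--     instead of A's nested scans."""
--     n = len(sequence)
--     COMP = {'A': 'U', 'U': 'AG', 'G': 'CU', 'C': 'G'}
--     first_pos = {}   # trigram -> smallest j in [i+6, n-4] with sequence[j:j+3] == trigram
--     out = []
--     for i in range(n - 10, -1, -1):
--         j = i + 6
--         if j <= n - 4:
--             first_pos[sequence[j:j + 3]] = j
--         # complement trigrams: t pairs with window iff t[0] compl s[i+2], t[1] compl s[i+1], t[2] compl s[i]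
--         best = None
--         for x in COMP.get(sequence[i + 2], ''):
--             for y in COMP.get(sequence[i + 1], ''):
--                 for z in COMP.get(sequence[i], ''):
--                     jp = first_pos.get(x + y + z)
--                     if jp is not None and (best is None or jp < best):
--                         best = jp
--         if best is not None:
--             out.append((i, best + 3))
--     out.reverse()
--     return out
-- ===== Notes on version B (the rewrite author's own statement) =====
-- stated objective: faster
-- what changed: Replaces A's per-start linear rescan of all later windows by a single backward sweep that maintains a dictionary mapping each trigram to its earliest in-window position, answering each start index by minimising over its at most 8 complementary trigrams.
import Mathlib
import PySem

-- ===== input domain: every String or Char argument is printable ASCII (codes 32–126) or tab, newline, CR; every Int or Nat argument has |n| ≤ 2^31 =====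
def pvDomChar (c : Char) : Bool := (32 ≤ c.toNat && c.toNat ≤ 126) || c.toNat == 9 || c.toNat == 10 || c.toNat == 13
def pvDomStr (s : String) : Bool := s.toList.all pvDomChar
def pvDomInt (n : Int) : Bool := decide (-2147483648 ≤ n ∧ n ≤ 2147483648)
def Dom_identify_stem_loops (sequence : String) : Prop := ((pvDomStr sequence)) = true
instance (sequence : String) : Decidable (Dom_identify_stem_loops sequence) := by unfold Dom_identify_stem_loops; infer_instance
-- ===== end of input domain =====

-- B replaces A's nested scans by one backward sweep over start indices with a rolling
-- first-occurrence trigram dictionary (objective: faster).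

-- ===== PORT A =====
-- are_complementary(base1, base2); arguments are the (possibly failing) 1-char lookups s[x]
def areComplementary (b1 b2 : Option Char) : Bool :=
  (b1 == some 'A' && b2 == some 'U') || (b1 == some 'U' && b2 == some 'A') ||
  (b1 == some 'G' && b2 == some 'C') || (b1 == some 'C' && b2 == some 'G') ||
  (b1 == some 'G' && b2 == some 'U') || (b1 == some 'U' && b2 == some 'G')

-- the 'for k in range(min_stem_length)' loop with its break (potential_stem flag)
def stemCheckA (cs : List Char) (i j : Int) : List Int → Bool
  | [] => true
  | k :: ks =>
      if !(areComplementary (PySem.List.pyGet? cs (i + k)) (PySem.List.pyGet? cs (j + 3 - 1 - k))) then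
        false
      else stemCheckA cs i j ks

-- the inner 'for j in range(i+min+3, len-min)' loop with its break
def innerA (cs : List Char) (i : Int) : List Int → Option Int
  | [] => none
  | j :: js => if stemCheckA cs i j (PySem.List.pyRange 0 3 1) then some j else innerA cs i js

def identify_stem_loops (sequence : String) : List (Int × Int) :=
  let cs := sequence.toList
  let n : Int := (cs.length : Int)
  (PySem.List.pyRange 0 (n - 2 * 3 - 3) 1).foldl
    (fun acc i =>
      match innerA cs i (PySem.List.pyRange (i + 3 + 3) (n - 3) 1) with
      | some j => acc ++ [(i, j + 3)]
      | none => acc)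
    []

-- ===== PORT B =====
-- COMP.get(c, '') for COMP = {'A':'U','U':'AG','G':'CU','C':'G'}
def compGet (b : Option Char) : List Char :=
  if b == some 'A' then ['U'] else if b == some 'U' then ['A', 'G']
  else if b == some 'G' then ['C', 'U'] else if b == some 'C' then ['G'] else []

-- 'if jp is not None and (best is None or jp < best): best = jp'
def bestUpd (best jp : Option Int) : Option Int :=
  match jp with
  | none => best
  | some v => match best with
      | none => some v
      | some bv => if v < bv then some v else best

-- the triple 'for x … for y … for z …' pattern loop
def bestOf (d : PySem.Dict (List Char) Int) (xs ys zs : List Char) : Option Int :=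
  xs.foldl (fun bx x =>
    ys.foldl (fun by' y =>
      zs.foldl (fun bz z => bestUpd bz (d.get? [x, y, z])) by') bx) none

def identify_stem_loops_alt (sequence : String) : List (Int × Int) :=
  let cs := sequence.toList
  let n : Int := (cs.length : Int)
  let st := (PySem.List.pyRange (n - 10) (-1) (-1)).foldl
    (fun (st : PySem.Dict (List Char) Int × List (Int × Int)) i =>
      let d := if i + 6 ≤ n - 4 then
                 st.1.insert (PySem.List.slice cs (some (i + 6)) (some (i + 6 + 3))) (i + 6)
               else st.1
      let best := bestOf d (compGet (PySem.List.pyGet? cs (i + 2)))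
                           (compGet (PySem.List.pyGet? cs (i + 1)))
                           (compGet (PySem.List.pyGet? cs i))
      match best with
      | some bv => (d, st.2 ++ [(i, bv + 3)])
      | none => (d, st.2))
    (PySem.Dict.empty, [])
  st.2.reverse

-- ===== PRECONDITION & SPEC =====
def Spec_identify_stem_loops (sequence : String) (out : List (Int × Int)) : Prop := out = identify_stem_loops_alt sequence
instance (sequence : String) (out : List (Int × Int)) : Decidable (Spec_identify_stem_loops sequence out) := by unfold Spec_identify_stem_loops; infer_instance

-- ===== CLAIM (what is proved, stated in full; the proofs are below) =====
def Claim_equal_identify_stem_loops : Prop := ∀ (sequence : String), Dom_identify_stem_loops sequence → Spec_identify_stem_loops sequence (identify_stem_loops sequence)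


-- ===== LEMMAS AND PROOFS =====

-- the inner window scan of A, as a find? over the j-window of start index i
def winFind (cs : List Char) (n i : Int) : Option Int :=
  (PySem.List.pyRange (i + 3 + 3) (n - 3) 1).find? (fun j => stemCheckA cs i j (PySem.List.pyRange 0 3 1))

-- the optional output entry contributed by start index i
def entryE (cs : List Char) (n : Int) (i : Int) : Option (Int × Int) :=
  (winFind cs n i).map (fun j => (i, j + 3))

-- first position ≥ a (below n-3) whose trigram is p
def Fnd (cs : List Char) (n a : Int) (p : List Char) : Option Int :=
  (PySem.List.pyRange a (n - 3) 1).find? (fun j => PySem.List.slice cs (some j) (some (j + 3)) == p)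

-- dictionary invariant of B's backward sweep
def DInv (cs : List Char) (n : Int) (d : PySem.Dict (List Char) Int) (a : Int) : Prop :=
  ∀ p, d.get? p = Fnd cs n a p

-- the ≤8 complement trigrams B enumerates for start index i
def pats (cs : List Char) (i : Int) : List (List Char) :=
  (compGet (PySem.List.pyGet? cs (i + 2))).flatMap (fun x =>
    (compGet (PySem.List.pyGet? cs (i + 1))).flatMap (fun y =>
      (compGet (PySem.List.pyGet? cs i)).map (fun z => [x, y, z])))

lemma areC_iff (a b : Char) :
    areComplementary (some a) (some b) = true ↔ b ∈ compGet (some a) := by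
  by_cases h1 : a = 'A'
  · subst h1; simp [areComplementary, compGet]
  by_cases h2 : a = 'U'
  · subst h2; simp [areComplementary, compGet]
  by_cases h3 : a = 'G'
  · subst h3; simp [areComplementary, compGet]
  by_cases h4 : a = 'C'
  · subst h4; simp [areComplementary, compGet]
  · simp [areComplementary, compGet, h1, h2, h3, h4]

lemma stemCheck_eq (cs : List Char) (i j : Int) :
    stemCheckA cs i j (PySem.List.pyRange 0 3 1) =
      (areComplementary (PySem.List.pyGet? cs i) (PySem.List.pyGet? cs (j + 2)) &&
       (areComplementary (PySem.List.pyGet? cs (i + 1)) (PySem.List.pyGet? cs (j + 1)) &&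
        areComplementary (PySem.List.pyGet? cs (i + 2)) (PySem.List.pyGet? cs j))) := by
  have h : PySem.List.pyRange 0 3 1 = [0, 1, 2] := by decide
  rw [h]
  simp only [stemCheckA]
  have e1 : i + (0 : Int) = i := by ring
  have e2 : j + 3 - 1 - 0 = j + 2 := by ring
  have e3 : j + 3 - 1 - 1 = j + 1 := by ring
  have e4 : j + 3 - 1 - 2 = j := by ring
  rw [e1, e2, e3, e4]
  cases areComplementary (PySem.List.pyGet? cs i) (PySem.List.pyGet? cs (j + 2)) <;>
    cases areComplementary (PySem.List.pyGet? cs (i + 1)) (PySem.List.pyGet? cs (j + 1)) <;>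
      cases areComplementary (PySem.List.pyGet? cs (i + 2)) (PySem.List.pyGet? cs j) <;> simp

lemma drop_take_three {α : Type} (l : List α) (a : Nat) (h : a + 2 < l.length) :
    (l.drop a).take 3 = [l[a], l[a + 1], l[a + 2]] := by
  apply List.ext_getElem
  · simp; omega
  · intro k hk1 hk2
    have hk : k < 3 := by
      simp only [List.length_take, List.length_drop] at hk1 ⊢; omega
    simp only [List.getElem_take, List.getElem_drop]
    interval_cases k <;> simp

lemma slice_three (cs : List Char) (j : Int) (hj : 0 ≤ j) (hj2 : j + 2 < (cs.length : Int)) :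
    PySem.List.slice cs (some j) (some (j + 3)) =
      [cs[j.toNat], cs[j.toNat + 1], cs[j.toNat + 2]] := by
  rw [PySem.List.slice_toNat cs hj (by omega)]
  have h3 : (j + 3).toNat - j.toNat = 3 := by omega
  rw [h3, drop_take_three cs j.toNat (by omega)]

lemma match_iff (cs : List Char) (i j : Int) (hi : 0 ≤ i) (hi2 : i + 2 < (cs.length : Int))
    (hj : 0 ≤ j) (hj2 : j + 2 < (cs.length : Int)) :
    (stemCheckA cs i j (PySem.List.pyRange 0 3 1) = true ↔
      PySem.List.slice cs (some j) (some (j + 3)) ∈ pats cs i) := by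
  have gi : PySem.List.pyGet? cs i = some cs[i.toNat] :=
    PySem.List.pyGet?_eq_some_getElem cs hi (by omega)
  have gi1 : PySem.List.pyGet? cs (i + 1) = some cs[(i + 1).toNat] :=
    PySem.List.pyGet?_eq_some_getElem cs (by omega) (by omega)
  have gi2 : PySem.List.pyGet? cs (i + 2) = some cs[(i + 2).toNat] :=
    PySem.List.pyGet?_eq_some_getElem cs (by omega) (by omega)
  have gj : PySem.List.pyGet? cs j = some cs[j.toNat] :=
    PySem.List.pyGet?_eq_some_getElem cs hj (by omega)
  have gj1 : PySem.List.pyGet? cs (j + 1) = some cs[(j + 1).toNat] :=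
    PySem.List.pyGet?_eq_some_getElem cs (by omega) (by omega)
  have gj2 : PySem.List.pyGet? cs (j + 2) = some cs[(j + 2).toNat] :=
    PySem.List.pyGet?_eq_some_getElem cs (by omega) (by omega)
  have ej1 : (j + 1).toNat = j.toNat + 1 := by omega
  have ej2 : (j + 2).toNat = j.toNat + 2 := by omega
  rw [stemCheck_eq, slice_three cs j hj hj2]
  simp only [pats, List.mem_flatMap, List.mem_map, Bool.and_eq_true,
    gi, gi1, gi2, gj, gj1, gj2, ej1, ej2, areC_iff]
  constructor
  · rintro ⟨h1, h2, h3⟩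
    exact ⟨cs[j.toNat], h3, cs[j.toNat + 1], h2, cs[j.toNat + 2], h1, rfl⟩
  · rintro ⟨x, hx, y, hy, z, hz, he⟩
    obtain ⟨rfl, rfl, rfl⟩ : x = cs[j.toNat] ∧ y = cs[j.toNat + 1] ∧ z = cs[j.toNat + 2] := by
      simpa using he
    exact ⟨hz, hy, hx⟩

lemma innerA_eq_find? (cs : List Char) (i : Int) (js : List Int) :
    innerA cs i js = js.find? (fun j => stemCheckA cs i j (PySem.List.pyRange 0 3 1)) := by
  induction js with
  | nil => rfl
  | cons j js ih =>
    rw [innerA, List.find?_cons]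
    by_cases h : stemCheckA cs i j (PySem.List.pyRange 0 3 1) = true
    · simp [h]
    · simp only [Bool.not_eq_true] at h; simp [h, ih]

lemma foldl_opt_append (f : Int → Option Int) (l : List Int) (acc : List (Int × Int)) :
    l.foldl (fun acc i => match f i with | some j => acc ++ [(i, j + 3)] | none => acc) acc
      = acc ++ l.filterMap (fun i => (f i).map (fun j => (i, j + 3))) := by
  induction l generalizing acc with
  | nil => simp
  | cons x xs ih => cases h : f x <;> simp [List.foldl_cons, h, ih]

lemma find?_le_of_pairwise {l : List Int} {p : Int → Bool} (hl : l.Pairwise (· < ·))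
    {x y : Int} (hx : l.find? p = some x) (hy : y ∈ l) (hpy : p y = true) : x ≤ y := by
  induction l with
  | nil => simp at hx
  | cons a t ih =>
    rw [List.find?_cons] at hx
    obtain ⟨ha, ht⟩ := List.pairwise_cons.mp hl
    cases hpa : p a with
    | true =>
      rw [hpa] at hx; simp at hx; subst hx
      rcases List.mem_cons.mp hy with rfl | hyt
      · exact le_refl _
      · exact le_of_lt (ha y hyt)
    | false =>
      rw [hpa] at hx; simp at hx
      rcases List.mem_cons.mp hy with rfl | hyt
      · rw [hpa] at hpy; exact absurd hpy (by simp)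
      · exact ih ht hx hyt

lemma bu_all_none (l : List (Option Int)) (h : ∀ o ∈ l, o = none) :
    l.foldl bestUpd none = none := by
  induction l with
  | nil => rfl
  | cons o t ih =>
    have ho : o = none := h o (by simp)
    rw [List.foldl_cons, ho]
    exact ih (fun o' ho' => h o' (by simp [ho']))

lemma bu_spec (l : List (Option Int)) (b : Option Int) :
    (l.foldl bestUpd b = none → b = none ∧ ∀ o ∈ l, o = none) ∧
    (∀ m, l.foldl bestUpd b = some m →
      ((b = some m ∨ some m ∈ l) ∧ ∀ v, (b = some v ∨ some v ∈ l) → m ≤ v)) := by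
  induction l generalizing b with
  | nil =>
    simp only [List.foldl_nil]
    refine ⟨fun h => ⟨h, by simp⟩, fun m hm => ⟨Or.inl hm, ?_⟩⟩
    rintro v (hv | hv)
    · rw [hm] at hv; injection hv with h; omega
    · simp at hv
  | cons o t ih =>
    rw [List.foldl_cons]
    obtain ⟨ih1, ih2⟩ := ih (bestUpd b o)
    constructor
    · intro h
      obtain ⟨hb, hall⟩ := ih1 h
      cases o with
      | none =>
        simp only [bestUpd] at hb
        exact ⟨hb, fun o' ho' => by
          rcases List.mem_cons.mp ho' with rfl | h' <;> [rfl; exact hall _ h']⟩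
      | some v =>
        exfalso
        cases b with
        | none => simp [bestUpd] at hb
        | some bv => simp only [bestUpd] at hb; split at hb <;> simp at hb
    · intro m hm
      obtain ⟨hmem, hlb⟩ := ih2 m hm
      constructor
      · rcases hmem with hmem | hmem
        · -- bestUpd b o = some m
          cases o with
          | none => exact Or.inl hmem
          | some v =>
            cases b with
            | none =>
              simp only [bestUpd] at hmem
              exact Or.inr (by simp [← Option.some_inj.mp hmem])
            | some bv =>
              simp only [bestUpd] at hmem
              split at hmem
              · exact Or.inr (by simp [← Option.some_inj.mp hmem])
              · exact Or.inl hmem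
        · exact Or.inr (List.mem_cons_of_mem _ hmem)
      · rintro v (hv | hv)
        · -- b = some v
          cases o with
          | none => exact hlb v (Or.inl (by simpa [bestUpd] using hv))
          | some w =>
            subst hv
            simp only [bestUpd] at hlb hmem
            split at hlb
            · next hlt =>
              have := hlb w (Or.inl rfl); omega
            · exact hlb v (Or.inl rfl)
        · rcases List.mem_cons.mp hv with heq | hvt
          · -- o = some v
            cases b with
            | none => exact hlb v (Or.inl (by rw [← heq]; rfl))
            | some bv =>
              rw [← heq] at hlb
              simp only [bestUpd] at hlb
              split at hlb
              · exact hlb v (Or.inl rfl)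
              · next hnlt =>
                have := hlb bv (Or.inl rfl); omega
          · exact hlb v (Or.inr hvt)

lemma bestOf_eq_fold (d : PySem.Dict (List Char) Int) (xs ys zs : List Char) :
    bestOf d xs ys zs =
      ((xs.flatMap (fun x => ys.flatMap (fun y => zs.map (fun z => [x, y, z])))).map
        d.get?).foldl bestUpd none := by
  rw [List.foldl_map]
  simp only [bestOf, List.foldl_flatMap, List.foldl_map]

lemma Fnd_some {cs : List Char} {n a : Int} {p : List Char} {v : Int}
    (h : Fnd cs n a p = some v) :
    v ∈ PySem.List.pyRange a (n - 3) 1 ∧ PySem.List.slice cs (some v) (some (v + 3)) = p := by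
  refine ⟨List.mem_of_find?_eq_some h, ?_⟩
  have := List.find?_some h
  simpa using this

lemma bestOf_winFind (cs : List Char) (n i : Int) (hn : n = (cs.length : Int))
    (d : PySem.Dict (List Char) Int) (hInv : DInv cs n d (i + 6))
    (hi : 0 ≤ i) (hi' : i ≤ n - 10) :
    bestOf d (compGet (PySem.List.pyGet? cs (i + 2))) (compGet (PySem.List.pyGet? cs (i + 1)))
      (compGet (PySem.List.pyGet? cs i)) = winFind cs n i := by
  have hwin : i + 3 + 3 = i + 6 := by ring
  have hmemW : ∀ j, j ∈ PySem.List.pyRange (i + 6) (n - 3) 1 → 0 ≤ j ∧ j + 2 < (cs.length : Int) := by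
    intro j hj
    have := (PySem.List.mem_pyRange_one).mp hj
    constructor <;> omega
  have hmatch : ∀ j, j ∈ PySem.List.pyRange (i + 6) (n - 3) 1 →
      (stemCheckA cs i j (PySem.List.pyRange 0 3 1) = true ↔
        PySem.List.slice cs (some j) (some (j + 3)) ∈ pats cs i) := by
    intro j hj
    obtain ⟨h1, h2⟩ := hmemW j hj
    exact match_iff cs i j hi (by omega) h1 h2
  rw [bestOf_eq_fold]
  have hpats : (compGet (PySem.List.pyGet? cs (i + 2))).flatMap
      (fun x => (compGet (PySem.List.pyGet? cs (i + 1))).flatMap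
        (fun y => (compGet (PySem.List.pyGet? cs i)).map (fun z => [x, y, z]))) = pats cs i := rfl
  rw [hpats]
  -- each dictionary value is a matching window position
  have hget : ∀ p ∈ pats cs i, ∀ v, d.get? p = some v →
      v ∈ PySem.List.pyRange (i + 6) (n - 3) 1 ∧
      stemCheckA cs i v (PySem.List.pyRange 0 3 1) = true := by
    intro p hp v hv
    rw [hInv p] at hv
    obtain ⟨hvW, hvsl⟩ := Fnd_some hv
    exact ⟨hvW, (hmatch v hvW).mpr (hvsl ▸ hp)⟩
  cases hw : winFind cs n i with
  | none =>
    apply bu_all_none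
    intro o ho
    obtain ⟨p, hp, rfl⟩ := List.mem_map.mp ho
    cases hv : d.get? p with
    | none => rfl
    | some v =>
      exfalso
      obtain ⟨hvW, hvm⟩ := hget p hp v hv
      have : (PySem.List.pyRange (i + 3 + 3) (n - 3) 1).find?
          (fun j => stemCheckA cs i j (PySem.List.pyRange 0 3 1)) = none := hw
      rw [hwin] at this
      rw [List.find?_eq_none] at this
      exact this v hvW hvm
  | some j0 =>
    have hw' : (PySem.List.pyRange (i + 6) (n - 3) 1).find?
        (fun j => stemCheckA cs i j (PySem.List.pyRange 0 3 1)) = some j0 := by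
      rw [← hwin]; exact hw
    have hj0W : j0 ∈ PySem.List.pyRange (i + 6) (n - 3) 1 := List.mem_of_find?_eq_some hw'
    have hj0m : stemCheckA cs i j0 (PySem.List.pyRange 0 3 1) = true := by simpa using List.find?_some hw'
    have hj0min : ∀ y ∈ PySem.List.pyRange (i + 6) (n - 3) 1,
        stemCheckA cs i y (PySem.List.pyRange 0 3 1) = true → j0 ≤ y :=
      fun y hy hpy => find?_le_of_pairwise (PySem.List.pairwise_lt_pyRange_one _ _) hw' hy hpy
    set p0 := PySem.List.slice cs (some j0) (some (j0 + 3)) with hp0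
    have hp0mem : p0 ∈ pats cs i := (hmatch j0 hj0W).mp hj0m
    -- d.get? p0 = some j0
    have hgp0 : d.get? p0 = some j0 := by
      rw [hInv p0]
      cases hf : Fnd cs n (i + 6) p0 with
      | none =>
        exfalso
        unfold Fnd at hf
        rw [List.find?_eq_none] at hf
        exact hf j0 hj0W (by simp [hp0])
      | some v =>
        obtain ⟨hvW, hvsl⟩ := Fnd_some hf
        have hvm : stemCheckA cs i v (PySem.List.pyRange 0 3 1) = true :=
          (hmatch v hvW).mpr (hvsl ▸ hp0mem)
        have h1 : j0 ≤ v := hj0min v hvW hvm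
        have h2 : v ≤ j0 :=
          find?_le_of_pairwise (PySem.List.pairwise_lt_pyRange_one _ _) hf hj0W (by simp [hp0])
        have : v = j0 := le_antisymm h2 h1
        rw [this]
    obtain ⟨hnone, hsome⟩ := bu_spec ((pats cs i).map d.get?) none
    cases hr : ((pats cs i).map d.get?).foldl bestUpd none with
    | none =>
      exfalso
      obtain ⟨_, hall⟩ := hnone hr
      have : d.get? p0 = none := hall _ (List.mem_map.mpr ⟨p0, hp0mem, rfl⟩)
      rw [hgp0] at this; simp at this
    | some m =>
      obtain ⟨hmem, hlb⟩ := hsome m hr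
      have hm_le : m ≤ j0 :=
        hlb j0 (Or.inr (List.mem_map.mpr ⟨p0, hp0mem, hgp0⟩))
      have hj0_le : j0 ≤ m := by
        rcases hmem with h | h
        · simp at h
        · obtain ⟨p, hp, hgp⟩ := List.mem_map.mp h
          obtain ⟨hmW, hmm⟩ := hget p hp m hgp
          exact hj0min m hmW hmm
      rw [le_antisymm hm_le hj0_le]

lemma DInv_empty (cs : List Char) (n a : Int) (h : n - 3 ≤ a) :
    DInv cs n PySem.Dict.empty a := by
  intro p
  rw [PySem.Dict.get?_empty]
  unfold Fnd
  rw [PySem.List.pyRange_one_eq_nil h]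
  rfl

lemma DInv_insert (cs : List Char) (n a : Int) (d : PySem.Dict (List Char) Int)
    (h : DInv cs n d (a + 1)) (ha : a < n - 3) :
    DInv cs n (d.insert (PySem.List.slice cs (some a) (some (a + 3))) a) a := by
  intro p
  unfold Fnd
  rw [PySem.List.pyRange_one_cons ha, List.find?_cons]
  by_cases hp : PySem.List.slice cs (some a) (some (a + 3)) = p
  · subst hp
    rw [PySem.Dict.get?_insert_self]
    simp
  · have hne : p ≠ PySem.List.slice cs (some a) (some (a + 3)) := fun he => hp he.symm
    rw [PySem.Dict.get?_insert_of_ne _ _ hne, h p]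
    have : (PySem.List.slice cs (some a) (some (a + 3)) == p) = false := by
      simp [hp]
    rw [this]
    rfl

lemma loopB_spec (cs : List Char) (n : Int) (hn : n = (cs.length : Int)) (t : Nat)
    (ht : (t : Int) ≤ n - 9 ∨ t = 0)
    (d : PySem.Dict (List Char) Int) (out : List (Int × Int))
    (hInv : DInv cs n d ((t : Int) + 6)) :
    ((PySem.List.pyRange ((t : Int) - 1) (-1) (-1)).foldl
      (fun (st : PySem.Dict (List Char) Int × List (Int × Int)) i =>
        let d := if i + 6 ≤ n - 4 then
                   st.1.insert (PySem.List.slice cs (some (i + 6)) (some (i + 6 + 3))) (i + 6)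
                 else st.1
        let best := bestOf d (compGet (PySem.List.pyGet? cs (i + 2)))
                             (compGet (PySem.List.pyGet? cs (i + 1)))
                             (compGet (PySem.List.pyGet? cs i))
        match best with
        | some bv => (d, st.2 ++ [(i, bv + 3)])
        | none => (d, st.2)) (d, out)).2
    = out ++ (PySem.List.pyRange ((t : Int) - 1) (-1) (-1)).filterMap (entryE cs n) := by
  induction t generalizing d out with
  | zero =>
    rw [PySem.List.pyRange_neg_one_eq_nil (by norm_num)]
    simp
  | succ t ih =>
    have htn : (t : Int) + 1 ≤ n - 9 := by
      rcases ht with h | h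
      · push_cast at h ⊢; omega
      · exact absurd h (Nat.succ_ne_zero t)
    have hcast : ((t + 1 : Nat) : Int) - 1 = (t : Int) := by push_cast; ring
    rw [hcast, PySem.List.pyRange_neg_one_cons (by omega), List.foldl_cons, List.filterMap_cons]
    have hcond : (t : Int) + 6 ≤ n - 4 := by omega
    have hInv7 : DInv cs n d ((t : Int) + 6 + 1) := by
      have : ((t + 1 : Nat) : Int) + 6 = (t : Int) + 6 + 1 := by push_cast; ring
      rw [this] at hInv; exact hInv
    have hInv6 : DInv cs n
        (d.insert (PySem.List.slice cs (some ((t : Int) + 6)) (some ((t : Int) + 6 + 3))) ((t : Int) + 6))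
        ((t : Int) + 6) := DInv_insert cs n _ d hInv7 (by omega)
    simp only [if_pos hcond]
    rw [bestOf_winFind cs n (t : Int) hn _ hInv6 (by positivity) (by omega)]
    cases hw : winFind cs n (t : Int) with
    | none =>
      rw [ih (Or.inl (by omega)) _ out hInv6]
      simp [entryE, hw]
    | some j =>
      rw [ih (Or.inl (by omega)) _ (out ++ [((t : Int), j + 3)]) hInv6]
      simp [entryE, hw]

-- ===== VERDICT (by name: the statement is the Claim_ definition above) =====
theorem identify_stem_loops_spec : Claim_equal_identify_stem_loops := by
  intro s _
  unfold Spec_identify_stem_loops identify_stem_loops identify_stem_loops_alt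
  set cs := s.toList with hcs
  set n : Int := (cs.length : Int) with hn
  simp only []
  -- A side
  rw [show n - 2 * 3 - 3 = n - 9 by ring]
  have hA : (PySem.List.pyRange 0 (n - 9) 1).foldl
      (fun acc i =>
        match innerA cs i (PySem.List.pyRange (i + 3 + 3) (n - 3) 1) with
        | some j => acc ++ [(i, j + 3)]
        | none => acc) [] =
      (PySem.List.pyRange 0 (n - 9) 1).filterMap (entryE cs n) := by
    have := foldl_opt_append (fun i => winFind cs n i) (PySem.List.pyRange 0 (n - 9) 1) []
    simp only [List.nil_append] at this
    have h2 : (fun i : Int => Option.map (fun j => (i, j + 3)) (winFind cs n i)) = entryE cs n := by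
      funext i; rfl
    rw [h2] at this
    refine Eq.trans ?_ this
    apply PySem.List.foldl_congr_mem
    intro acc i _
    rw [innerA_eq_find? cs i]
    rfl
  rw [hA]
  -- B side
  set T : Nat := (n - 9).toNat with hT
  have hdesc : PySem.List.pyRange (n - 10) (-1) (-1) = PySem.List.pyRange ((T : Int) - 1) (-1) (-1) := by
    by_cases h9 : 9 ≤ n
    · congr 1; omega
    · rw [PySem.List.pyRange_neg_one_eq_nil (by omega),
        PySem.List.pyRange_neg_one_eq_nil (by omega)]
  rw [hdesc]
  have hInv0 : DInv cs n PySem.Dict.empty ((T : Int) + 6) :=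
    DInv_empty cs n _ (by by_cases h9 : 9 ≤ n <;> omega)
  have ht0 : ((T : Int) ≤ n - 9 ∨ T = 0) := by
    by_cases h9 : 9 ≤ n
    · left; omega
    · right; omega
  rw [loopB_spec cs n hn T ht0 PySem.Dict.empty [] hInv0]
  rw [List.nil_append]
  rw [PySem.List.pyRange_neg_one_eq_reverse]
  rw [show (T : Int) - 1 + 1 = (T : Int) by ring]
  rw [show (-1 : Int) + 1 = 0 by ring]
  rw [List.filterMap_reverse, List.reverse_reverse]
  congr 1
  by_cases h9 : 9 ≤ n
  · congr 1; omega
  · rw [PySem.List.pyRange_one_eq_nil (by omega), PySem.List.pyRange_one_eq_nil (by omega)]
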